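-- pv_equiv track=rewrite | github.com/Building-With-Agents/wfd-os | agents/market-intelligence/bd-pipeline/agent14.py | _pick_best_contact
-- ===== SOURCE A (Python) =====
-- TITLE_PRIORITY = {
--     "executive director": 1,
--     "chief executive officer": 2, "ceo": 2,
--     "chief operating officer": 3, "coo": 3,
--     "chief information officer": 4, "cio": 4,
--     "director of operations": 5,
--     "director of technology": 6,
--     "vp": 7, "vice president": 7,
--     "managing partner": 8,
--     "practice administrator": 9,
--     "deputy director": 10,
--     "president": 11,
--     "commissioner": 12,
--     "technology officer": 13,
--     "director": 14,
--     "manager": 15,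
-- }
--
-- def _title_score(title):
--     """Score a title against buyer profile. Lower = better match."""
--     if not title:
--         return 999
--     t = title.lower()
--     for keyword, score in TITLE_PRIORITY.items():
--         if keyword in t:
--             return score
--     return 999
--
-- def _pick_best_contact(contacts, recommended_buyer):
--     """Pick best contact from a list using title scoring."""
--     if not contacts:
--         return None
--
--     # Boost contacts matching recommended_buyer
--     scored = []
--     for c in contacts:
--         title = c.get("title") or ""
--         base_score = _title_score(title)
--
--         # Boost if matches recommended buyer
--         if recommended_buyer:
--             buyer_words = [w.lower() for w in recommended_buyer.split() if len(w) > 3]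
--             if any(w in title.lower() for w in buyer_words):
--                 base_score -= 50
--
--         # Penalize if no email
--         if not c.get("email"):
--             base_score += 100
--
--         scored.append((base_score, c))
--
--     scored.sort(key=lambda x: x[0])
--     return scored[0][1]
-- ===== SOURCE B (Python) =====
-- TITLE_PRIORITY = {
--     "executive director": 1,
--     "chief executive officer": 2, "ceo": 2,
--     "chief operating officer": 3, "coo": 3,
--     "chief information officer": 4, "cio": 4,
--     "director of operations": 5,
--     "director of technology": 6,
--     "vp": 7, "vice president": 7,
--     "managing partner": 8,
--     "practice administrator": 9,
--     "deputy director": 10,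
--     "president": 11,
--     "commissioner": 12,
--     "technology officer": 13,
--     "director": 14,
--     "manager": 15,
-- }
--
-- def _title_score(title):
--     """Score a title against buyer profile. Lower = better match."""
--     if not title:
--         return 999
--     t = title.lower()
--     for keyword, score in TITLE_PRIORITY.items():
--         if keyword in t:
--             return score
--     return 999
--
-- def _pick_best_contact(contacts, recommended_buyer):
--     """Pick best contact: single min-scan with a score key, no list, no sort."""
--     if not contacts:
--         return None
--     buyer_words = ([w.lower() for w in recommended_buyer.split() if len(w) > 3]
--                    if recommended_buyer else [])
--
--     def score(c):
--         title = c.get("title") or ""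
--         s = _title_score(title)
--         if any(w in title.lower() for w in buyer_words):
--             s -= 50
--         if not c.get("email"):
--             s += 100
--         return s
--
--     return min(contacts, key=score)
-- ===== Notes on version B (the rewrite author's own statement) =====
-- stated objective: simpler
-- what changed: Replaces building a (score, contact) list and stably sorting it with a single min() scan over contacts using a score key (buyer words hoisted out of the loop); first-minimum tie-break of min matches the stable sort's head.
import Mathlib
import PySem

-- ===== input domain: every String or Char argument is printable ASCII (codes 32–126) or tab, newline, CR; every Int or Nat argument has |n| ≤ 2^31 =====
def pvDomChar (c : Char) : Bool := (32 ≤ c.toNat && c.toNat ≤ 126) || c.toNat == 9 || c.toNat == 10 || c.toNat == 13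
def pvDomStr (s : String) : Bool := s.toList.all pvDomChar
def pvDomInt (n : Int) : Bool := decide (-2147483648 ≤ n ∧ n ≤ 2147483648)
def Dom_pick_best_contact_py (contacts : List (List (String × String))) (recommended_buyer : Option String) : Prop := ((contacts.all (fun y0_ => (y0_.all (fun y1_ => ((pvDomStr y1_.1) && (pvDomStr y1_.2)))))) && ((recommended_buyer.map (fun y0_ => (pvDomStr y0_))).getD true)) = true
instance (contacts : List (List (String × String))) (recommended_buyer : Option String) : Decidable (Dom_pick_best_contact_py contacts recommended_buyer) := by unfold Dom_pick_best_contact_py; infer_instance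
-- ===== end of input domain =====

-- B replaces A's build-scored-list-then-stable-sort with a single min-scan using a
-- score key (buyer words hoisted out of the loop); same return value, simpler.

-- ===== PORT A =====
-- TITLE_PRIORITY dict: all keys distinct, so the items list is the dict in insertion order
def pvTitlePriority : List (String × Int) :=
  [("executive director", 1),
   ("chief executive officer", 2), ("ceo", 2),
   ("chief operating officer", 3), ("coo", 3),
   ("chief information officer", 4), ("cio", 4),
   ("director of operations", 5),
   ("director of technology", 6),
   ("vp", 7), ("vice president", 7),
   ("managing partner", 8),
   ("practice administrator", 9),
   ("deputy director", 10),
   ("president", 11),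
   ("commissioner", 12),
   ("technology officer", 13),
   ("director", 14),
   ("manager", 15)]

-- _title_score (shared: both Pythons call the identical helper)
def pvTitleScore (title : String) : Int :=
  if title == "" then 999
  else
    let t := PySem.Str.lower title
    match pvTitlePriority.find? (fun kv => PySem.Str.isIn kv.1 t) with
    | some kv => kv.2
    | none => 999

-- c.get(k) on the contact dict (association list, first match)
def pvGet (c : List (String × String)) (k : String) : Option String :=
  (c.find? (fun kv => kv.1 == k)).map (fun kv => kv.2)

-- A's loop body: score of one contact (buyer_words recomputed per contact, as in A)
def pvScoreA (recommended_buyer : Option String) (c : List (String × String)) : Int :=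
  let title := (pvGet c "title").getD ""    -- c.get("title") or ""
  let base := pvTitleScore title
  let base :=
    match recommended_buyer with
    | none => base
    | some rb =>
      if rb == "" then base                 -- `if recommended_buyer:` falsy
      else
        let bw := ((PySem.Str.split₀ rb).filter (fun w => PySem.Str.len w > 3)).map PySem.Str.lower
        if bw.any (fun w => PySem.Str.isIn w (PySem.Str.lower title)) then base - 50 else base
  if (pvGet c "email").getD "" == "" then base + 100 else base   -- `if not c.get("email")`

def pick_best_contact_py (contacts : List (List (String × String))) (recommended_buyer : Option String) : Option (List (String × String)) :=
  if contacts = [] then none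
  else
    let scored := contacts.foldl (fun acc c => acc ++ [(pvScoreA recommended_buyer c, c)]) []
    match (PySem.List.sorted scored (fun x => x.1) false).head? with
    | some p => some p.2
    | none => none   -- unreachable: contacts ≠ []

-- ===== PORT B =====
-- buyer_words, computed once before the scan
def pvBuyerWords (recommended_buyer : Option String) : List String :=
  match recommended_buyer with
  | none => []
  | some rb =>
    if rb == "" then []
    else ((PySem.Str.split₀ rb).filter (fun w => PySem.Str.len w > 3)).map PySem.Str.lower

-- B's score key for one contact
def pvScoreB (bw : List String) (c : List (String × String)) : Int :=
  let title := (pvGet c "title").getD ""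
  let s := pvTitleScore title
  let s := if bw.any (fun w => PySem.Str.isIn w (PySem.Str.lower title)) then s - 50 else s
  if (pvGet c "email").getD "" == "" then s + 100 else s

def pick_best_contact_py_alt (contacts : List (List (String × String))) (recommended_buyer : Option String) : Option (List (String × String)) :=
  if contacts = [] then none
  else PySem.List.min? contacts (pvScoreB (pvBuyerWords recommended_buyer))

-- ===== PRECONDITION & SPEC =====
def Spec_pick_best_contact_py (contacts : List (List (String × String))) (recommended_buyer : Option String) (out : Option (List (String × String))) : Prop := out = pick_best_contact_py_alt contacts recommended_buyer
instance (contacts : List (List (String × String))) (recommended_buyer : Option String) (out : Option (List (String × String))) : Decidable (Spec_pick_best_contact_py contacts recommended_buyer out) := by unfold Spec_pick_best_contact_py; infer_instance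

-- ===== CLAIM (what is proved, stated in full; the proofs are below) =====
def Claim_equal_pick_best_contact_py : Prop := ∀ (contacts : List (List (String × String))) (recommended_buyer : Option String), Dom_pick_best_contact_py contacts recommended_buyer → Spec_pick_best_contact_py contacts recommended_buyer (pick_best_contact_py contacts recommended_buyer)

-- ===== LEMMAS AND PROOFS =====

-- the two per-contact scores coincide
theorem pvScore_eq (rb : Option String) (c : List (String × String)) :
    pvScoreA rb c = pvScoreB (pvBuyerWords rb) c := by
  cases rb with
  | none => simp [pvScoreA, pvScoreB, pvBuyerWords]
  | some s =>
    by_cases h : s = ""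
    · simp [pvScoreA, pvScoreB, pvBuyerWords, h]
    · simp [pvScoreA, pvScoreB, pvBuyerWords, h]

-- one min?-fold step
def pvMinStep {α : Type} (key : α → Int) (acc : Option α) (x : α) : Option α :=
  match acc with
  | none => some x
  | some m => if key x < key m then some x else some m

theorem head?_insertBy {α : Type} (key : α → Int) (x : α) (acc : List α) :
    (PySem.List.insertBy (fun a b => decide (key a < key b)) x acc).head? =
      pvMinStep key acc.head? x := by
  cases acc with
  | nil => simp [PySem.List.insertBy, pvMinStep]
  | cons m t =>
    by_cases h : key x < key m
    · simp [PySem.List.insertBy, pvMinStep, h]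
    · simp [PySem.List.insertBy, pvMinStep, h]

theorem head?_foldl_insertBy {α : Type} (key : α → Int) (xs : List α) (acc : List α) :
    (xs.foldl (fun acc x => PySem.List.insertBy (fun a b => decide (key a < key b)) x acc) acc).head? =
      xs.foldl (pvMinStep key) acc.head? := by
  induction xs generalizing acc with
  | nil => rfl
  | cons x t ih => simp only [List.foldl_cons, ih, head?_insertBy]

-- head of the stable sort is the first minimum
theorem head?_sorted_eq_min? {α : Type} (key : α → Int) (xs : List α) :
    (PySem.List.sorted xs key false).head? = PySem.List.min? xs key := by
  rw [PySem.List.sorted_eq_foldl_insertBy, head?_foldl_insertBy]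
  rfl

-- A's scored list is a map
theorem foldl_append_map {α β : Type} (f : α → β) (xs : List α) (acc : List β) :
    xs.foldl (fun acc c => acc ++ [f c]) acc = acc ++ xs.map f := by
  induction xs generalizing acc with
  | nil => simp
  | cons x t ih => simp [ih]

-- min? over the decorated list projects to min? over the originals
theorem foldl_minStep_map {α : Type} (g : α → Int) (xs : List α) (acc : Option α) :
    (xs.map (fun c => (g c, c))).foldl (pvMinStep (fun x => x.1)) (acc.map (fun c => (g c, c))) =
      (xs.foldl (pvMinStep g) acc).map (fun c => (g c, c)) := by
  induction xs generalizing acc with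
  | nil => rfl
  | cons x t ih =>
    cases acc with
    | none => simpa using ih (some x)
    | some m =>
      by_cases h : g x < g m
      · simpa [pvMinStep, h] using ih (some x)
      · simpa [pvMinStep, h] using ih (some m)

theorem min?_map {α : Type} (g : α → Int) (xs : List α) :
    PySem.List.min? (xs.map (fun c => (g c, c))) (fun x => x.1) =
      (PySem.List.min? xs g).map (fun c => (g c, c)) := by
  have := foldl_minStep_map g xs none
  simpa [PySem.List.min?, pvMinStep] using this

-- ===== VERDICT (by name: the statement is the Claim_ definition above) =====
theorem pick_best_contact_py_spec : Claim_equal_pick_best_contact_py := by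
  intro contacts rb _
  unfold Spec_pick_best_contact_py pick_best_contact_py pick_best_contact_py_alt
  by_cases hc : contacts = []
  · simp [hc]
  · simp only [hc, if_false]
    have hsc : pvScoreA rb = pvScoreB (pvBuyerWords rb) := funext (pvScore_eq rb)
    rw [foldl_append_map, List.nil_append, head?_sorted_eq_min?, hsc, min?_map]
    cases h : PySem.List.min? contacts (pvScoreB (pvBuyerWords rb)) with
    | none => simp
    | some m => simp
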